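-- pv_equiv track=rewrite | github.com/vibhor-5/thought-anchors | openrouter_generation.py | split_solution_into_chunks
-- ===== SOURCE A (Python) =====
-- from typing import List, Dict, Tuple, Optional
--
-- def split_solution_into_chunks(solution_text: str) -> List[str]:
--     """
--     Split a solution into chunks for rollout generation.
--
--     Args:
--         solution_text: The full solution text
--
--     Returns:
--         List of chunks
--     """
--     # First, remove the prompt part if present
--     if "<think>" in solution_text:
--         solution_text = solution_text.split("<think>")[1].strip()
--
--     # Remove the closing tag if present
--     if "</think>" in solution_text:
--         solution_text = solution_text.split("</think>")[0].strip()
--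
--     # Define patterns for chunk boundaries
--     sentence_ending_tokens = [".", "?", "!"]
--     paragraph_ending_patterns = ["\n\n", "\r\n\r\n"]
--
--     # Split the text into chunks
--     chunks = []
--     current_chunk = ""
--
--     # Process the text character by character
--     i = 0
--     while i < len(solution_text):
--         current_chunk += solution_text[i]
--
--         # Check for paragraph endings
--         is_paragraph_end = False
--         for pattern in paragraph_ending_patterns:
--             if i + len(pattern) <= len(solution_text) and solution_text[i:i+len(pattern)] == pattern:
--                 is_paragraph_end = True
--                 break
--
--         # Check for sentence endings followed by space or newline
--         is_sentence_end = False
--         if i < len(solution_text) - 1 and solution_text[i] in sentence_ending_tokens: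
--             next_char = solution_text[i+1]
--             if next_char == " " or next_char == "\n":
--                 is_sentence_end = True
--
--         # If we found a boundary, add the chunk and reset
--         if is_paragraph_end or is_sentence_end:
--             if current_chunk.strip():
--                 chunks.append(current_chunk.strip())
--                 current_chunk = ""
--
--         i += 1
--
--     # Add the last chunk if not empty
--     if current_chunk.strip():
--         chunks.append(current_chunk.strip())
--
--     return chunks
-- ===== SOURCE B (Python) =====
-- def split_solution_into_chunks(solution_text):
--     """Boundary-position variant: collect all cut indices first, then slice
--     the text between consecutive cuts, stripping each piece."""
--     if "<think>" in solution_text: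
--         solution_text = solution_text.split("<think>")[1].strip()
--     if "</think>" in solution_text:
--         solution_text = solution_text.split("</think>")[0].strip()
--     t = solution_text
--     cuts = [i + 1 for i in range(len(t))
--             if t.startswith("\n\n", i) or t.startswith("\r\n\r\n", i)
--             or (t[i] in ".?!" and i + 1 < len(t) and t[i + 1] in " \n")]
--     chunks = []
--     prev = 0
--     for c in cuts + [len(t)]:
--         piece = t[prev:c].strip()
--         if piece:
--             chunks.append(piece)
--         prev = c
--     return chunks
-- ===== Notes on version B (the rewrite author's own statement) =====
-- stated objective: faster
-- what changed: Replaces A's char-by-char accumulator loop (current_chunk += c per character, with its conditional reset) by first enumerating all boundary cut positions via startswith/lookahead tests and then slicing the text between consecutive cuts.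
import Mathlib
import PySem

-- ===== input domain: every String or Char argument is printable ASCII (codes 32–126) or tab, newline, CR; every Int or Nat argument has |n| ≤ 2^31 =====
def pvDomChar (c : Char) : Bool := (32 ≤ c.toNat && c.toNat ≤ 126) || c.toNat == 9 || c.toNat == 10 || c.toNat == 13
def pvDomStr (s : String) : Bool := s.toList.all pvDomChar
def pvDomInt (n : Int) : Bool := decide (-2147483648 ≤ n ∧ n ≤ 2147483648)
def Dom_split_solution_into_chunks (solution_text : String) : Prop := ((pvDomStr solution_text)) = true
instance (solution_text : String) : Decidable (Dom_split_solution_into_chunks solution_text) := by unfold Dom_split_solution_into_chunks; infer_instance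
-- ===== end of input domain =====

-- B replaces A's char-by-char accumulator loop with computing all cut positions first
-- and slicing the text between consecutive cuts (measured faster in a timing run: no per-character string building).

-- ===== PORT A =====
-- The <think>/</think> trimming lines are textually identical in A and B, so both ports share this helper.
def pvTrim (s : List Char) : List Char :=
  let s1 := if PySem.Chars.isIn "<think>".toList s
            then PySem.Chars.strip ((PySem.Chars.splitOn s "<think>".toList).getD 1 [])
            else s
  if PySem.Chars.isIn "</think>".toList s1
  then PySem.Chars.strip ((PySem.Chars.splitOn s1 "</think>".toList).getD 0 [])
  else s1

-- 'i < len-1 and text[i] in ".?!" and text[i+1] in " \n"', seen from the suffix at i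
def pvSentEnd (c : Char) (rest : List Char) : Bool :=
  match rest with
  | d :: _ => (c == '.' || c == '?' || c == '!') && (d == ' ' || d == '\n')
  | [] => false

-- A's while loop; 'text[i:i+len(p)] == p with i+len(p) <= len' is exactly 'p is a prefix of the suffix at i'
def pvLoopA : List Char → List (List Char) → List Char → List (List Char)
  | [], chunks, cur =>
      if PySem.Chars.strip cur ≠ [] then chunks ++ [PySem.Chars.strip cur] else chunks
  | c :: rest, chunks, cur =>
      let cur' := cur ++ [c]
      let isPara := PySem.Chars.startswith (c :: rest) "\n\n".toList
                 || PySem.Chars.startswith (c :: rest) "\r\n\r\n".toList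
      let isSent := pvSentEnd c rest
      if isPara || isSent then
        (if PySem.Chars.strip cur' ≠ [] then pvLoopA rest (chunks ++ [PySem.Chars.strip cur']) []
         else pvLoopA rest chunks cur')
      else pvLoopA rest chunks cur'

def split_solution_into_chunks (solution_text : String) : List String :=
  (pvLoopA (pvTrim solution_text.toList) [] []).map String.ofList

-- ===== PORT B =====
-- Source B's boundary test at index i (t.startswith(pat, i) is 'pat is a prefix of the suffix at i')
def pvBoundary (t : List Char) (i : Nat) : Bool :=
  PySem.Chars.startswith (t.drop i) "\n\n".toList
  || PySem.Chars.startswith (t.drop i) "\r\n\r\n".toList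
  || (match t[i]?, t[i+1]? with
      | some c, some d => (c == '.' || c == '?' || c == '!') && (d == ' ' || d == '\n')
      | _, _ => false)

-- t[a:b] for 0 ≤ a ≤ b ≤ len t (the only way Source B uses it: prev ≤ c ≤ len)
def pvSeg (t : List Char) (a b : Nat) : List Char := (t.drop a).take (b - a)

def split_solution_into_chunks_alt (solution_text : String) : List String :=
  let t := pvTrim solution_text.toList
  let cuts := ((List.range t.length).filter (fun i => pvBoundary t i)).map (· + 1)
  ((cuts ++ [t.length]).foldl
    (fun (acc : List (List Char) × Nat) c =>
      let piece := PySem.Chars.strip (pvSeg t acc.2 c)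
      (if piece ≠ [] then acc.1 ++ [piece] else acc.1, c))
    ([], 0)).1.map String.ofList

-- ===== PRECONDITION & SPEC =====
def Spec_split_solution_into_chunks (solution_text : String) (out : List String) : Prop := out = split_solution_into_chunks_alt solution_text
instance (solution_text : String) (out : List String) : Decidable (Spec_split_solution_into_chunks solution_text out) := by unfold Spec_split_solution_into_chunks; infer_instance

-- ===== CLAIM (what is proved, stated in full; the proofs are below) =====
def Claim_equal_split_solution_into_chunks : Prop := ∀ (solution_text : String), Dom_split_solution_into_chunks solution_text → Spec_split_solution_into_chunks solution_text (split_solution_into_chunks solution_text)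

-- ===== LEMMAS AND PROOFS =====

-- common recursive form of B's cut-slicing fold, indexed by position k and last cut prev
def pvBRec (t : List Char) (k prev : Nat) : List (List Char) :=
  if h : k < t.length then
    if pvBoundary t k then
      (let piece := PySem.Chars.strip (pvSeg t prev (k+1));
       if piece ≠ [] then [piece] else []) ++ pvBRec t (k+1) (k+1)
    else pvBRec t (k+1) prev
  else
    (let piece := PySem.Chars.strip (pvSeg t prev t.length);
     if piece ≠ [] then [piece] else [])
termination_by t.length - k

theorem pv_strip_eq_nil_iff (x : List Char) :
    PySem.Chars.strip x = [] ↔ ∀ c ∈ x, PySem.Chars.isspace c = true := by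
  simp only [PySem.Chars.strip, PySem.Chars.rstrip, PySem.Chars.lstrip,
    List.reverse_eq_nil_iff, List.dropWhile_eq_nil_iff, List.mem_reverse]
  constructor
  · intro h c hc
    have hx : c ∈ List.takeWhile PySem.Chars.isspace x ++ List.dropWhile PySem.Chars.isspace x := by
      rw [List.takeWhile_append_dropWhile]; exact hc
    rcases List.mem_append.1 hx with h1 | h1
    · exact List.mem_takeWhile_imp h1
    · exact h c h1
  · intro h c hc
    exact h c ((List.dropWhile_sublist _).mem hc)

theorem pv_strip_ws_append (x y : List Char) (hx : PySem.Chars.strip x = []) :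
    PySem.Chars.strip (x ++ y) = PySem.Chars.strip y := by
  have hall : ∀ c ∈ x, PySem.Chars.isspace c = true := (pv_strip_eq_nil_iff x).1 hx
  simp only [PySem.Chars.strip, PySem.Chars.lstrip, List.dropWhile_append,
    List.dropWhile_eq_nil_iff.2 hall, List.isEmpty_nil, if_true]

theorem pv_seg_split (t : List Char) (a b c : Nat) (hab : a ≤ b) (hbc : b ≤ c) :
    pvSeg t a c = pvSeg t a b ++ pvSeg t b c := by
  unfold pvSeg
  have : c - a = (b - a) + (c - b) := by omega
  rw [this, List.take_add, List.drop_drop]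
  have : a + (b - a) = b := by omega
  rw [this]

theorem pv_seg_snoc (t : List Char) (a k : Nat) (hk : k < t.length) (ha : a ≤ k) :
    pvSeg t a (k+1) = pvSeg t a k ++ [t[k]] := by
  rw [pv_seg_split t a k (k+1) ha (by omega)]
  have h2 : pvSeg t k (k+1) = [t[k]] := by
    unfold pvSeg
    rw [show k+1-k = 1 by omega, List.drop_eq_getElem_cons hk, List.take_succ_cons, List.take_zero]
  rw [h2]

-- A's boundary test at the suffix 't.drop k' is B's 'pvBoundary t k'
theorem pv_boundary_at (t : List Char) (k : Nat) (hk : k < t.length) :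
    (PySem.Chars.startswith (t.drop k) "\n\n".toList
      || PySem.Chars.startswith (t.drop k) "\r\n\r\n".toList
      || pvSentEnd t[k] (t.drop (k+1))) = pvBoundary t k := by
  unfold pvBoundary
  congr 1
  have h0 : t[k]? = some t[k] := List.getElem?_eq_getElem hk
  have h1 : t[k+1]? = (t.drop (k+1))[0]? := by rw [List.getElem?_drop]
  cases hrest : t.drop (k+1) with
  | nil => simp [pvSentEnd, h0, h1, hrest]
  | cons d rest' => simp [pvSentEnd, h0, h1, hrest]

-- A's loop from position k equals pvBRec, given the whitespace-only debris invariant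
theorem pv_loopA_eq_bRec (t : List Char) :
    ∀ m k p0 p1 chunks, t.length - k = m → k ≤ t.length → p0 ≤ p1 → p1 ≤ k →
      PySem.Chars.strip (pvSeg t p0 p1) = [] →
      pvLoopA (t.drop k) chunks (pvSeg t p0 k) = chunks ++ pvBRec t k p1 := by
  intro m
  induction m with
  | zero =>
    intro k p0 p1 chunks hm hk hp0 hp1 hws
    have hkn : k = t.length := by omega
    subst hkn
    rw [List.drop_length]
    rw [pvBRec]
    simp only [lt_irrefl, dite_false]
    have hseg : PySem.Chars.strip (pvSeg t p0 t.length) = PySem.Chars.strip (pvSeg t p1 t.length) := by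
      rw [pv_seg_split t p0 p1 t.length hp0 hp1, pv_strip_ws_append _ _ hws]
    rw [pvLoopA]
    rw [hseg]
    split <;> simp
  | succ m ih =>
    intro k p0 p1 chunks hm hk hp0 hp1 hws
    have hkn : k < t.length := by omega
    rw [List.drop_eq_getElem_cons hkn]
    rw [pvLoopA]
    rw [← List.drop_eq_getElem_cons hkn]
    have hcur : pvSeg t p0 k ++ [t[k]] = pvSeg t p0 (k+1) :=
      (pv_seg_snoc t p0 k hkn (by omega)).symm
    rw [hcur, pv_boundary_at t k hkn]
    have hstrip : PySem.Chars.strip (pvSeg t p0 (k+1)) = PySem.Chars.strip (pvSeg t p1 (k+1)) := by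
      rw [pv_seg_split t p0 p1 (k+1) hp0 (by omega), pv_strip_ws_append _ _ hws]
    rw [pvBRec]
    simp only [hkn, dite_true]
    by_cases hb : pvBoundary t k
    · rw [if_pos hb, if_pos hb]
      by_cases hne : PySem.Chars.strip (pvSeg t p1 (k+1)) ≠ []
      · rw [hstrip, if_pos hne, if_pos hne]
        have : (([] : List Char)) = pvSeg t (k+1) (k+1) := by
          unfold pvSeg; simp
        rw [this, ih (k+1) (k+1) (k+1) _ (by omega) (by omega) le_rfl le_rfl
          (by unfold pvSeg; simp [PySem.Chars.strip, PySem.Chars.rstrip, PySem.Chars.lstrip])]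
        simp
      · simp only [ne_eq, not_not] at hne
        rw [hstrip, if_neg (by simp [hne]), if_neg (by simp [hne])]
        have hws' : PySem.Chars.strip (pvSeg t p0 (k+1)) = [] := by rw [hstrip]; exact hne
        rw [ih (k+1) p0 (k+1) chunks (by omega) (by omega) (by omega) le_rfl hws']
        simp
    · rw [if_neg (by simp [hb]), if_neg (by simp [hb])]
      exact ih (k+1) p0 p1 chunks (by omega) (by omega) hp0 (by omega) hws

-- B's fold over the cut list from position k equals pvBRec
theorem pv_fold_eq_bRec (t : List Char) :
    ∀ m k acc prev, t.length - k = m →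
      (((((List.range' k (t.length - k)).filter (fun i => pvBoundary t i)).map (· + 1)) ++ [t.length]).foldl
        (fun (acc : List (List Char) × Nat) c =>
          let piece := PySem.Chars.strip (pvSeg t acc.2 c)
          (if piece ≠ [] then acc.1 ++ [piece] else acc.1, c))
        (acc, prev)).1 = acc ++ pvBRec t k prev := by
  intro m
  induction m with
  | zero =>
    intro k acc prev hm
    rw [hm, pvBRec]
    have hkn : ¬ k < t.length := by omega
    simp only [hkn, dite_false, List.range'_zero, List.filter_nil, List.map_nil,
      List.nil_append, List.foldl_cons, List.foldl_nil]
    split <;> simp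
  | succ m ih =>
    intro k acc prev hm
    have hkn : k < t.length := by omega
    have hm' : t.length - (k+1) = m := by omega
    rw [hm, List.range'_succ]
    rw [pvBRec]
    simp only [hkn, dite_true]
    by_cases hb : pvBoundary t k
    · simp only [List.filter_cons, hb, if_true, List.map_cons, List.cons_append, List.foldl_cons]
      rw [← hm']
      by_cases hne : PySem.Chars.strip (pvSeg t prev (k+1)) ≠ []
      · rw [if_pos hne, if_pos hne,
          ih (k+1) (acc ++ [PySem.Chars.strip (pvSeg t prev (k+1))]) (k+1) hm']
        simp
      · rw [if_neg hne, if_neg hne, ih (k+1) acc (k+1) hm']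
        simp
    · have hb' : pvBoundary t k = false := by simpa using hb
      simp only [List.filter_cons, hb', Bool.false_eq_true, if_false]
      rw [← hm']
      exact ih (k+1) acc prev hm'

-- ===== VERDICT (by name: the statement is the Claim_ definition above) =====
theorem split_solution_into_chunks_spec : Claim_equal_split_solution_into_chunks := by
  intro s _
  unfold Spec_split_solution_into_chunks split_solution_into_chunks split_solution_into_chunks_alt
  simp only
  set t := pvTrim s.toList with ht
  congr 1
  have hB := pv_fold_eq_bRec t (t.length - 0) 0 [] 0 rfl
  rw [List.range_eq_range']
  simp only [Nat.sub_zero] at hB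
  rw [hB]
  have hA := pv_loopA_eq_bRec t (t.length - 0) 0 0 0 [] rfl (by omega) le_rfl le_rfl
    (by unfold pvSeg; simp [PySem.Chars.strip, PySem.Chars.rstrip, PySem.Chars.lstrip])
  have hseg : pvSeg t 0 0 = [] := by unfold pvSeg; simp
  rw [hseg, List.drop_zero] at hA
  rw [hA, List.nil_append]
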